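-- pv_equiv track=rewrite | github.com/onegi95/CTstudy | day02/Haseok Jang/greedyQ6.py | solution
-- ===== SOURCE A (Python) =====
-- def solution(food_times, k):
--     idx = 0
--     for i in range(k):
--         food_times[idx] -= 1
--         idx+=1
--         idx%=3
--     total = 0
--     for i in food_times:
--         if i<0:
--             total += i
--     return(idx - total)%3+1
-- ===== SOURCE B (Python) =====
-- def solution(food_times, k):
--     q, r = divmod(k, 3)
--     adjusted = [v - q - (j < r) for j, v in enumerate(food_times[:3])] + food_times[3:]
--     total = sum(v for v in adjusted if v < 0)
--     return (r - total) % 3 + 1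
-- ===== Notes on version B (the rewrite author's own statement) =====
-- stated objective: faster
-- what changed: B replaces A's k-iteration simulation loop with closed-form per-index decrement counts divmod(k,3) applied to the first three entries; Pre_ restricts to the natural domain of nonnegative turn counts k (A's value for negative k is just the no-op of range(k)) and excludes the inputs where A raises IndexError (k>=1 with fewer than min(k,3) foods); B does not mutate food_times.
-- outside the precondition, e.g. on solution([1, 2, 3], -2): A returns 1, B returns 2
import Mathlib
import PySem

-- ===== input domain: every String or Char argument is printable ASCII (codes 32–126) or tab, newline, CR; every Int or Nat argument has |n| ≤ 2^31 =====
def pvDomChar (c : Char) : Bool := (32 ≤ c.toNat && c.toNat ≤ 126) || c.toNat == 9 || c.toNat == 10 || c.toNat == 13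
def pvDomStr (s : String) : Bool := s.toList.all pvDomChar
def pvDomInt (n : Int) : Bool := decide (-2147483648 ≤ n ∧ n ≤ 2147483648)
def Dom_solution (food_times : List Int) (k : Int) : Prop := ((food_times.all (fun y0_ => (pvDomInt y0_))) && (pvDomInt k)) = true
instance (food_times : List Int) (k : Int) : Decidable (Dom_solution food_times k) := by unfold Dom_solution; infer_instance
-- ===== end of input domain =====

-- B computes the per-index decrements in closed form with divmod(k,3) instead of simulating k turns;
-- A mutates food_times in place, B does not — the equivalence proved is about the return value only.

-- ===== PORT A =====
-- the for-i-in-range(k) loop: state (food_times, idx); idx stays in [0,3) so idx.toNat is exact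
def aLoop : Nat → List Int → Int → List Int × Int
  | 0, ft, idx => (ft, idx)
  | n+1, ft, idx =>
      aLoop n (ft.set idx.toNat ((ft.getD idx.toNat 0) - 1)) (PySem.Int.mod (idx + 1) 3)

def solution (food_times : List Int) (k : Int) : Int :=
  let s := aLoop k.toNat food_times 0
  let total := s.1.foldl (fun t i => if i < 0 then t + i else t) 0
  PySem.Int.mod (s.2 - total) 3 + 1

-- ===== PORT B =====
def solution_alt (food_times : List Int) (k : Int) : Int :=
  let q := PySem.Int.floordiv k 3
  let r := PySem.Int.mod k 3
  let adjusted :=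
    (PySem.List.enumerate (PySem.List.slice food_times none (some 3)) 0).map
      (fun jv => jv.2 - q - (if jv.1 < r then 1 else 0))
    ++ PySem.List.slice food_times (some 3) none
  let total := (adjusted.filter (fun v => v < 0)).sum
  PySem.Int.mod (r - total) 3 + 1

-- ===== PRECONDITION & SPEC =====
-- Pre_ restricts to the natural domain of nonnegative turn counts k (for k < 0 A's range(k) loop is
-- a no-op, a value of the simulation B does not reproduce) and excludes the inputs where A raises
-- IndexError (k ≥ 1 with fewer than min(k,3) foods).
def Pre_solution (food_times : List Int) (k : Int) : Prop :=
  0 ≤ k ∧ min k 3 ≤ (food_times.length : Int)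
instance (food_times : List Int) (k : Int) : Decidable (Pre_solution food_times k) := by
  unfold Pre_solution; infer_instance
def pvWitness_solution : List Int × Int := ([3, 1, 2], 5)

def Spec_solution (food_times : List Int) (k : Int) (out : Int) : Prop := out = solution_alt food_times k
instance (food_times : List Int) (k : Int) (out : Int) : Decidable (Spec_solution food_times k out) := by unfold Spec_solution; infer_instance

-- ===== CLAIM (what is proved, stated in full; the proofs are below) =====
def Claim_equal_solution : Prop := ∀ (food_times : List Int) (k : Int), Dom_solution food_times k → Pre_solution food_times k → Spec_solution food_times k (solution food_times k)

-- ===== LEMMAS AND PROOFS =====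

-- per-index decrement: q+1 for j < r, q for r ≤ j < 3, 0 from index 3 on
def dec (q r j : Int) : Int := if j < 3 then q + (if j < r then 1 else 0) else 0

-- the list A's first loop produces, built positionally
def adjust (q r : Int) : List Int → Int → List Int
  | [], _ => []
  | v :: vs, s => (v - dec q r s) :: adjust q r vs (s + 1)

theorem sum_filter_eq_foldl (xs : List Int) (t : Int) :
    t + (xs.filter (fun v => v < 0)).sum
      = xs.foldl (fun t i => if i < 0 then t + i else t) t := by
  induction xs generalizing t with
  | nil => simp
  | cons v vs ih =>
      simp only [List.filter_cons, List.foldl_cons]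
      by_cases h : v < 0
      · simp only [decide_eq_true h, if_true, List.sum_cons, if_pos h]
        rw [← ih (t + v)]; ring
      · simp only [if_neg h, decide_eq_false h]
        exact ih t

theorem adjust_high (q r : Int) (xs : List Int) (s : Int) (hs : 3 ≤ s) : adjust q r xs s = xs := by
  induction xs generalizing s with
  | nil => rfl
  | cons v vs ih =>
      simp only [adjust, dec]
      rw [if_neg (by omega), ih (s + 1) (by omega)]
      simp

-- B's adjusted list (map over the first-three slice, rest appended) is A's final list
theorem badjust_eq (q r : Int) (ft : List Int) :
    (PySem.List.enumerate (PySem.List.slice ft none (some 3)) 0).map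
        (fun jv => jv.2 - q - (if jv.1 < r then 1 else 0))
      ++ PySem.List.slice ft (some 3) none
    = adjust q r ft 0 := by
  have hto : PySem.List.slice ft none (some (3:Int)) = ft.take 3 := by
    simpa using PySem.List.slice_to_natCast ft 3
  have hfrom : PySem.List.slice ft (some (3:Int)) none = ft.drop 3 := by
    simpa using PySem.List.slice_from_natCast ft 3
  rw [hto, hfrom]
  have key : ∀ (v j : Int), v - q - (if j < r then 1 else 0) = v - (q + if j < r then 1 else 0) := by
    intro v j; split_ifs <;> ring
  match ft with
  | [] => simp [PySem.List.enumerate_nil, adjust]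
  | [a] =>
      simp only [List.take, List.drop, PySem.List.enumerate_cons, PySem.List.enumerate_nil,
        List.map, adjust, dec, List.nil_append, List.cons_append]
      norm_num [key]
  | [a, b] =>
      simp only [List.take, List.drop, PySem.List.enumerate_cons, PySem.List.enumerate_nil,
        List.map, adjust, dec, List.nil_append, List.cons_append]
      norm_num [key]
  | a :: b :: c :: rest =>
      simp only [List.take, List.drop, PySem.List.enumerate_cons, PySem.List.enumerate_nil,
        List.map, adjust, dec, List.nil_append, List.cons_append,
        adjust_high q r rest (0+1+1+1) (by norm_num)]
      norm_num [key]

theorem aLoop_three (n : Nat) (a b c : Int) (rest : List Int) :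
    aLoop (n + 3) (a :: b :: c :: rest) 0 = aLoop n ((a - 1) :: (b - 1) :: (c - 1) :: rest) 0 := by
  have m1 : PySem.Int.mod (0 + 1) 3 = 1 := by decide
  have m2 : PySem.Int.mod (1 + 1) 3 = 2 := by decide
  have m3 : PySem.Int.mod (2 + 1) 3 = 0 := by decide
  show aLoop (n + 1 + 1 + 1) _ _ = _
  simp only [aLoop, m1, m2, m3, Int.toNat_zero, Int.toNat_one,
    show (2:Int).toNat = 2 from rfl, List.getD, List.set]
  simp

theorem aLoop_mul (m : Nat) (s : Nat) (a b c : Int) (rest : List Int) :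
    aLoop (3 * m + s) (a :: b :: c :: rest) 0 = aLoop s ((a - m) :: (b - m) :: (c - m) :: rest) 0 := by
  induction m generalizing a b c with
  | zero => simp
  | succ p ih =>
      have h : 3 * (p + 1) + s = (3 * p + s) + 3 := by ring
      rw [h, aLoop_three, ih]
      push_cast
      ring_nf

theorem aLoop_zero' (l : List Int) : aLoop 0 l 0 = (l, 0) := rfl

theorem aLoop_one (a : Int) (rest : List Int) :
    aLoop 1 (a :: rest) 0 = ((a - 1) :: rest, 1) := by
  have m1 : PySem.Int.mod (0 + 1) 3 = 1 := by decide
  simp only [aLoop, m1, Int.toNat_zero, List.getD, List.set]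
  simp

theorem aLoop_two (a b : Int) (rest : List Int) :
    aLoop 2 (a :: b :: rest) 0 = ((a - 1) :: (b - 1) :: rest, 2) := by
  have m1 : PySem.Int.mod (0 + 1) 3 = 1 := by decide
  have m2 : PySem.Int.mod (1 + 1) 3 = 2 := by decide
  show aLoop (1 + 1) _ _ = _
  simp only [aLoop, m1, m2, Int.toNat_zero, Int.toNat_one, List.getD, List.set]
  simp

-- A's final state on a ≥3-element list equals B's adjusted list, for k ≥ 1
theorem aLoop_char (k : Int) (hk : 1 ≤ k) (a b c : Int) (rest : List Int) :
    aLoop k.toNat (a :: b :: c :: rest) 0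
      = (adjust (PySem.Int.floordiv k 3) (PySem.Int.mod k 3) (a :: b :: c :: rest) 0,
         PySem.Int.mod k 3) := by
  have h3 : (0:Int) < 3 := by norm_num
  rw [PySem.Int.floordiv_eq_ediv_of_pos h3, PySem.Int.mod_eq_emod_of_pos h3]
  have hq0 : 0 ≤ k / 3 := Int.ediv_nonneg (by omega) (by norm_num)
  have hr : 0 ≤ k % 3 ∧ k % 3 < 3 := ⟨Int.emod_nonneg k (by norm_num), Int.emod_lt_of_pos k h3⟩
  have hk3 : k = 3 * (k / 3) + k % 3 := by omega
  have hkt : k.toNat = 3 * (k / 3).toNat + (k % 3).toNat := by omega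
  rw [hkt, aLoop_mul]
  have hm : ((k / 3).toNat : Int) = k / 3 := by omega
  rw [hm]
  have hadj : ∀ s, 3 ≤ s → adjust (k / 3) (k % 3) rest s = rest := fun s hs => adjust_high _ _ _ s hs
  have hcases : (k % 3).toNat = 0 ∨ (k % 3).toNat = 1 ∨ (k % 3).toNat = 2 := by omega
  rcases hcases with h | h | h <;> rw [h]
  · rw [aLoop_zero']
    have hr0 : k % 3 = 0 := by omega
    simp only [adjust, dec]
    rw [hadj (0+1+1+1) (by norm_num), hr0]
    simp only [Prod.mk.injEq, List.cons.injEq]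
    norm_num
  · rw [aLoop_one]
    have hr0 : k % 3 = 1 := by omega
    simp only [adjust, dec]
    rw [hadj (0+1+1+1) (by norm_num), hr0]
    simp only [Prod.mk.injEq, List.cons.injEq]
    norm_num
    omega
  · rw [aLoop_two]
    have hr0 : k % 3 = 2 := by omega
    simp only [adjust, dec]
    rw [hadj (0+1+1+1) (by norm_num), hr0]
    simp only [Prod.mk.injEq, List.cons.injEq]
    norm_num
    omega

-- with q = r = 0 the adjusted list is the original list
theorem adjust_zero (xs : List Int) (s : Int) (hs : 0 ≤ s) : adjust 0 0 xs s = xs := by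
  induction xs generalizing s with
  | nil => rfl
  | cons v vs ih =>
      simp only [adjust, dec]
      rw [ih (s + 1) (by omega)]
      split_ifs with h1 h2 <;> simp
      omega

-- ===== VERDICT (by name: the statement is the Claim_ definition above) =====
theorem solution_spec : Claim_equal_solution := by
  intro ft k _ hpre
  obtain ⟨hk0, hlen⟩ := hpre
  unfold Spec_solution solution solution_alt
  simp only []
  rw [badjust_eq, ← sum_filter_eq_foldl _ 0]
  by_cases hk : 1 ≤ k
  · rcases ft with _ | ⟨a, _ | ⟨b, _ | ⟨c, rest⟩⟩⟩
    · exfalso; simp only [List.length_nil] at hlen; omega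
    · have hk1 : k = 1 := by simp only [List.length_cons, List.length_nil] at hlen; omega
      subst hk1
      rw [show (1:Int).toNat = 1 from rfl, aLoop_one]
      simp only [show PySem.Int.floordiv 1 3 = 0 from by decide,
        show PySem.Int.mod 1 3 = 1 from by decide, adjust, dec]
      norm_num
    · have hk2 : k = 1 ∨ k = 2 := by
        simp only [List.length_cons, List.length_nil] at hlen; omega
      rcases hk2 with rfl | rfl
      · rw [show (1:Int).toNat = 1 from rfl, aLoop_one]
        simp only [show PySem.Int.floordiv 1 3 = 0 from by decide,
          show PySem.Int.mod 1 3 = 1 from by decide, adjust, dec]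
        norm_num
      · rw [show (2:Int).toNat = 2 from rfl, aLoop_two]
        simp only [show PySem.Int.floordiv 2 3 = 0 from by decide,
          show PySem.Int.mod 2 3 = 2 from by decide, adjust, dec]
        norm_num
    · rw [aLoop_char k hk]
      rw [zero_add]
  · have hk0' : k = 0 := by omega
    subst hk0'
    rw [show (0:Int).toNat = 0 from rfl, aLoop_zero',
      show PySem.Int.floordiv 0 3 = 0 from by decide,
      show PySem.Int.mod 0 3 = 0 from by decide, adjust_zero ft 0 le_rfl]
    rw [zero_add]
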